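-- pv_equiv track=rewrite | github.com/kenneth1203/qlib | tests/T2c_ai_advice.py | _expand_stages
-- ===== SOURCE A (Python) =====
-- from typing import Any, Dict, List, Optional, Tuple
--
-- STAGE_ORDER = ["technical", "fundamental", "news", "social", "bull", "bear", "manager", "trade"]
--
-- def _expand_stages(raw: str) -> List[str]:
-- 	if raw.strip().lower() == "all":
-- 		selected = set(STAGE_ORDER)
-- 	else:
-- 		parts = [p.strip().lower() for p in raw.split(",") if p.strip()]
-- 		selected = set([p for p in parts if p in STAGE_ORDER])
-- 	if "manager" in selected:
-- 		selected.update({"bull", "bear"})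
-- 	if "trade" in selected:
-- 		selected.update({"manager", "bull", "bear"})
-- 	return [s for s in STAGE_ORDER if s in selected]
-- ===== SOURCE B (Python) =====
-- from typing import List
--
-- STAGE_ORDER = ["technical", "fundamental", "news", "social", "bull", "bear", "manager", "trade"]
--
-- # Dependency table: each stage maps to the stages it requires.
-- DEPS = {"manager": ["bull", "bear"], "trade": ["manager"]}
--
-- def _expand_stages(raw: str) -> List[str]:
-- 	if raw.strip().lower() == "all":
-- 		selected = set(STAGE_ORDER)
-- 	else:
-- 		selected = {p for p in (q.strip().lower() for q in raw.split(",")) if p in STAGE_ORDER}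
-- 		# close under DEPS; len(STAGE_ORDER) rounds always reach the fixpoint
-- 		for _ in range(len(STAGE_ORDER)):
-- 			selected = selected | {d for s in selected for d in DEPS.get(s, [])}
-- 	return [s for s in STAGE_ORDER if s in selected]
-- ===== Notes on version B (the rewrite author's own statement) =====
-- stated objective: alternative
-- what changed: A's two hardcoded manager/trade expansion branches are replaced by a dependency table plus a rounds-bounded fixpoint closure loop (trade->manager->{bull,bear} resolved by iteration), and the parse collapses to one comprehension; same cost, data-driven instead of branch-coded.
import Mathlib
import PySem

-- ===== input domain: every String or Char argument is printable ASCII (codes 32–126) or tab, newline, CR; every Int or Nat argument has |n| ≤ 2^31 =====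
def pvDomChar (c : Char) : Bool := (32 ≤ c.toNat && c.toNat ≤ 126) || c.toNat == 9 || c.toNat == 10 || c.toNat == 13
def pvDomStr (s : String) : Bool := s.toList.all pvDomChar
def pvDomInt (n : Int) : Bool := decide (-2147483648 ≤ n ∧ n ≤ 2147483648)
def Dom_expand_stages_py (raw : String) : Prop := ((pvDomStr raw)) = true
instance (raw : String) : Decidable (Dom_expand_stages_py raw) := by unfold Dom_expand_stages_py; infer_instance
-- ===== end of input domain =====

-- B replaces A's two hardcoded manager/trade expansion branches by a dependency table
-- closed under a bounded fixpoint loop (alternative, table-driven; same cost).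


-- ===== PORT A =====
def STAGE_ORDER : List String :=
  ["technical", "fundamental", "news", "social", "bull", "bear", "manager", "trade"]

-- raw.split(",") never raises (separator non-empty), so split? is always some
def expand_stages_py (raw : String) : List String :=
  let selected : PySem.Set String :=
    if PySem.Str.lower (PySem.Str.strip raw) = "all" then
      PySem.Set.ofList STAGE_ORDER
    else
      let parts := (((PySem.Str.split? raw ",").getD []).filter
          (fun p => !(PySem.Str.strip p == ""))).map
          (fun p => PySem.Str.lower (PySem.Str.strip p))
      PySem.Set.ofList (parts.filter (fun p => STAGE_ORDER.contains p))
  let selected :=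
    if PySem.Set.contains selected "manager" then
      PySem.Set.update selected ["bull", "bear"]
    else selected
  let selected :=
    if PySem.Set.contains selected "trade" then
      PySem.Set.update selected ["manager", "bull", "bear"]
    else selected
  STAGE_ORDER.filter (fun s => PySem.Set.contains selected s)

-- ===== PORT B =====
-- dependency table: each stage maps to the stages it requires
def DEPS : PySem.Dict String (List String) :=
  PySem.Dict.ofList [("manager", ["bull", "bear"]), ("trade", ["manager"])]

-- one round: selected = selected | {d for s in selected for d in DEPS.get(s, [])}
def bStep (sel : PySem.Set String) : PySem.Set String :=
  PySem.Set.union sel (PySem.Set.ofList (sel.flatMap (fun s => PySem.Dict.getD DEPS s [])))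

-- 'for _ in range(n): selected = selected | …'
def bClose (n : Nat) (sel : PySem.Set String) : PySem.Set String :=
  match n with
  | 0 => sel
  | n + 1 => bClose n (bStep sel)

def expand_stages_py_alt (raw : String) : List String :=
  let selected : PySem.Set String :=
    if PySem.Str.lower (PySem.Str.strip raw) = "all" then
      PySem.Set.ofList STAGE_ORDER
    else
      bClose STAGE_ORDER.length
        (PySem.Set.ofList
          ((((PySem.Str.split? raw ",").getD []).map
              (fun q => PySem.Str.lower (PySem.Str.strip q))).filter
            (fun p => STAGE_ORDER.contains p)))
  STAGE_ORDER.filter (fun s => PySem.Set.contains selected s)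

-- ===== PRECONDITION & SPEC =====
def Spec_expand_stages_py (raw : String) (out : List String) : Prop := out = expand_stages_py_alt raw
instance (raw : String) (out : List String) : Decidable (Spec_expand_stages_py raw out) := by unfold Spec_expand_stages_py; infer_instance

-- ===== CLAIM (what is proved, stated in full; the proofs are below) =====
def Claim_equal_expand_stages_py : Prop := ∀ (raw : String), Dom_expand_stages_py raw → Spec_expand_stages_py raw (expand_stages_py raw)

-- ===== LEMMAS AND PROOFS =====

theorem depsOf_eq (a : String) :
    PySem.Dict.getD DEPS a [] =
      if a = "manager" then ["bull", "bear"]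
      else if a = "trade" then ["manager"] else [] := by
  have hD : DEPS = PySem.Dict.mk [("manager", ["bull", "bear"]), ("trade", ["manager"])] := rfl
  rw [PySem.Dict.getD_eq_get?_getD, hD, PySem.Dict.get?_mk_cons, PySem.Dict.get?_mk_cons]
  by_cases h1 : a = "manager"
  · subst h1; simp
  · by_cases h2 : a = "trade"
    · subst h2; simp
    · simp [PySem.Dict.get?, Ne.symm h1, Ne.symm h2, h1, h2]

-- membership after one closure round
theorem mem_bStep (sel : PySem.Set String) (x : String) :
    x ∈ bStep sel ↔
      x ∈ sel ∨ ((x = "bull" ∨ x = "bear") ∧ "manager" ∈ sel) ∨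
        (x = "manager" ∧ "trade" ∈ sel) := by
  unfold bStep
  rw [PySem.Set.mem_union, PySem.Set.mem_ofList, List.mem_flatMap]
  simp only [depsOf_eq]
  constructor
  · rintro (h | ⟨a, ha, hx⟩)
    · exact Or.inl h
    · split_ifs at hx with h1 h2
      · subst h1
        simp only [List.mem_cons, List.not_mem_nil, or_false] at hx
        exact Or.inr (Or.inl ⟨hx, ha⟩)
      · subst h2
        simp only [List.mem_singleton] at hx
        exact Or.inr (Or.inr ⟨hx, ha⟩)
      · simp at hx
  · rintro (h | ⟨hx, hm⟩ | ⟨rfl, ht⟩)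
    · exact Or.inl h
    · refine Or.inr ⟨"manager", hm, ?_⟩
      rcases hx with rfl | rfl <;> simp
    · exact Or.inr ⟨"trade", ht, by simp⟩

-- the closure invariant: membership in the fully expanded set
def phi (t : PySem.Set String) (x : String) : Prop :=
  x ∈ t ∨ ((x = "bull" ∨ x = "bear") ∧ ("manager" ∈ t ∨ "trade" ∈ t)) ∨
    (x = "manager" ∧ "trade" ∈ t)

theorem mem_trade_bStep (t : PySem.Set String) : "trade" ∈ bStep t ↔ "trade" ∈ t := by
  rw [mem_bStep]; simp

theorem mem_manager_bStep (t : PySem.Set String) :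
    "manager" ∈ bStep t ↔ "manager" ∈ t ∨ "trade" ∈ t := by
  rw [mem_bStep]; simp

theorem phi_bStep (t : PySem.Set String) (x : String) : phi (bStep t) x ↔ phi t x := by
  unfold phi
  rw [mem_bStep, mem_manager_bStep, mem_trade_bStep]
  tauto

theorem mem_bStep_bStep (t : PySem.Set String) (x : String) :
    x ∈ bStep (bStep t) ↔ phi t x := by
  unfold phi
  rw [mem_bStep, mem_bStep, mem_manager_bStep, mem_trade_bStep]
  tauto

-- membership after the full loop
theorem mem_bClose8 (sel : PySem.Set String) (x : String) :
    x ∈ bClose 8 sel ↔ phi sel x := by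
  have h8 : bClose 8 sel =
      bStep (bStep (bStep (bStep (bStep (bStep (bStep (bStep sel))))))) := rfl
  rw [h8, mem_bStep_bStep, phi_bStep, phi_bStep, phi_bStep, phi_bStep, phi_bStep, phi_bStep]

-- the two parsed base lists have the same members
theorem base_mem (L : List String) (x : String) :
    (x ∈ ((L.filter (fun p => !(PySem.Str.strip p == ""))).map
        (fun p => PySem.Str.lower (PySem.Str.strip p))).filter
        (fun p => STAGE_ORDER.contains p)) ↔
    (x ∈ (L.map (fun q => PySem.Str.lower (PySem.Str.strip q))).filter
        (fun p => STAGE_ORDER.contains p)) := by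
  simp only [List.mem_filter, List.mem_map, List.mem_filter]
  constructor
  · rintro ⟨⟨p, ⟨hpL, _⟩, rfl⟩, hg⟩
    exact ⟨⟨p, hpL, rfl⟩, hg⟩
  · rintro ⟨⟨p, hpL, rfl⟩, hg⟩
    refine ⟨⟨p, ⟨hpL, ?_⟩, rfl⟩, hg⟩
    simp only [Bool.not_eq_eq_eq_not, Bool.not_true, beq_eq_false_iff_ne, ne_eq]
    intro h0
    rw [h0] at hg
    revert hg
    decide

-- ===== VERDICT (by name: the statement is the Claim_ definition above) =====
set_option maxHeartbeats 1000000 in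
theorem expand_stages_py_spec : Claim_equal_expand_stages_py := by
  intro raw _
  unfold Spec_expand_stages_py expand_stages_py expand_stages_py_alt
  by_cases hall : PySem.Str.lower (PySem.Str.strip raw) = "all"
  · simp only [if_pos hall]
    decide
  · simp only [if_neg hall]
    generalize hL : (PySem.Str.split? raw ",").getD [] = L
    set lA := ((L.filter (fun p => !(PySem.Str.strip p == ""))).map
        (fun p => PySem.Str.lower (PySem.Str.strip p))).filter
        (fun p => STAGE_ORDER.contains p) with hlA
    set lB := (L.map (fun q => PySem.Str.lower (PySem.Str.strip q))).filter
        (fun p => STAGE_ORDER.contains p) with hlB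
    set A0 : PySem.Set String := PySem.Set.ofList lA with hA0
    have hlen : STAGE_ORDER.length = 8 := rfl
    rw [hlen]
    refine List.filter_congr (fun s _ => ?_)
    have hbase : ∀ y, y ∈ lA ↔ y ∈ lB := fun y => base_mem L y
    have hmem0 : ∀ y, y ∈ A0 ↔ y ∈ lB := fun y => (PySem.Set.mem_ofList lA y).trans (hbase y)
    by_cases hm : PySem.Set.contains A0 "manager" = true
    · have hm' : "manager" ∈ lB := (hmem0 _).mp ((PySem.Set.contains_iff A0 "manager").mp hm)
      have ht12 : PySem.Set.contains (PySem.Set.update A0 ["bull", "bear"]) "trade"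
          = PySem.Set.contains A0 "trade" := by
        rw [Bool.eq_iff_iff, PySem.Set.contains_iff, PySem.Set.contains_iff,
          PySem.Set.mem_update]
        simp
      rw [if_pos hm, ht12]
      by_cases ht : PySem.Set.contains A0 "trade" = true
      · have ht' : "trade" ∈ lB := (hmem0 _).mp ((PySem.Set.contains_iff A0 "trade").mp ht)
        rw [if_pos ht, Bool.eq_iff_iff, PySem.Set.contains_iff, PySem.Set.contains_iff,
          mem_bClose8]
        simp only [phi, PySem.Set.mem_update, PySem.Set.mem_ofList, hmem0, List.mem_cons,
          List.not_mem_nil, or_false]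
        constructor
        · rintro ((h | h) | h)
          · exact Or.inl h
          · exact Or.inr (Or.inl ⟨h, Or.inl hm'⟩)
          · rcases h with rfl | h
            · exact Or.inr (Or.inr ⟨rfl, ht'⟩)
            · exact Or.inr (Or.inl ⟨h, Or.inl hm'⟩)
        · rintro (h | ⟨h, _⟩ | ⟨rfl, _⟩)
          · exact Or.inl (Or.inl h)
          · exact Or.inl (Or.inr h)
          · exact Or.inr (Or.inl rfl)
      · have ht' : "trade" ∉ lB := fun h =>
          ht ((PySem.Set.contains_iff A0 "trade").mpr ((hmem0 _).mpr h))
        rw [if_neg ht, Bool.eq_iff_iff, PySem.Set.contains_iff, PySem.Set.contains_iff,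
          mem_bClose8]
        simp only [phi, PySem.Set.mem_update, PySem.Set.mem_ofList, hmem0, List.mem_cons,
          List.not_mem_nil, or_false]
        constructor
        · rintro (h | h)
          · exact Or.inl h
          · exact Or.inr (Or.inl ⟨h, Or.inl hm'⟩)
        · rintro (h | ⟨h, _⟩ | ⟨rfl, h⟩)
          · exact Or.inl h
          · exact Or.inr h
          · exact absurd h ht'
    · have hm' : "manager" ∉ lB := fun h =>
        hm ((PySem.Set.contains_iff A0 "manager").mpr ((hmem0 _).mpr h))
      rw [if_neg hm]
      by_cases ht : PySem.Set.contains A0 "trade" = true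
      · have ht' : "trade" ∈ lB := (hmem0 _).mp ((PySem.Set.contains_iff A0 "trade").mp ht)
        rw [if_pos ht, Bool.eq_iff_iff, PySem.Set.contains_iff, PySem.Set.contains_iff,
          mem_bClose8]
        simp only [phi, PySem.Set.mem_update, PySem.Set.mem_ofList, hmem0, List.mem_cons,
          List.not_mem_nil, or_false]
        constructor
        · rintro (h | h)
          · exact Or.inl h
          · rcases h with rfl | rfl | rfl
            · exact Or.inr (Or.inr ⟨rfl, ht'⟩)
            · exact Or.inr (Or.inl ⟨Or.inl rfl, Or.inr ht'⟩)
            · exact Or.inr (Or.inl ⟨Or.inr rfl, Or.inr ht'⟩)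
        · rintro (h | ⟨h, _⟩ | ⟨rfl, _⟩)
          · exact Or.inl h
          · rcases h with rfl | rfl
            · exact Or.inr (Or.inr (Or.inl rfl))
            · exact Or.inr (Or.inr (Or.inr rfl))
          · exact Or.inr (Or.inl rfl)
      · have ht' : "trade" ∉ lB := fun h =>
          ht ((PySem.Set.contains_iff A0 "trade").mpr ((hmem0 _).mpr h))
        rw [if_neg ht, Bool.eq_iff_iff, PySem.Set.contains_iff, PySem.Set.contains_iff,
          mem_bClose8]
        simp only [phi, PySem.Set.mem_ofList, hmem0]
        constructor
        · exact fun h => Or.inl h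
        · rintro (h | ⟨_, hmt | hmt⟩ | ⟨_, hmt⟩)
          · exact h
          · exact absurd hmt hm'
          · exact absurd hmt ht'
          · exact absurd hmt ht'
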